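-- pv_equiv track=rewrite | github.com/cssaritama/RAG-Mental-Health-Assistant-Project | retrieval/rerank.py | rerank_by_overlap
-- ===== SOURCE A (Python) =====
-- def rerank_by_overlap(candidates, query):
--     qset = set(query.lower().split())
--     scored = []
--     for c in candidates:
--         text = c.get("text", "") if isinstance(c, dict) else c
--         words = set(text.lower().split())
--         overlap = len(qset & words)
--         scored.append((overlap, c))
--     scored.sort(reverse=True, key=lambda x: x[0])
--     return [c for _, c in scored]
-- ===== SOURCE B (Python) =====
-- def rerank_by_overlap(candidates, query):
--     qset = set(query.lower().split())
--
--     def _score(c):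
--         text = c.get("text", "") if isinstance(c, dict) else c
--         return len(qset & set(text.lower().split()))
--
--     scored = [(_score(c), c) for c in candidates]
--     out = []
--     for s in range(len(qset), -1, -1):
--         out.extend(c for v, c in scored if v == s)
--     return out
-- ===== Notes on version B (the rewrite author's own statement) =====
-- stated objective: alternative
-- what changed: B drops A's stable reverse sort of the scored list and instead emits candidates class by class, scanning possible overlap scores from len(qset) down to 0 (a counting/selection pass over score values), which reproduces A's descending order and stable tie order without any comparison sort.
import Mathlib
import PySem

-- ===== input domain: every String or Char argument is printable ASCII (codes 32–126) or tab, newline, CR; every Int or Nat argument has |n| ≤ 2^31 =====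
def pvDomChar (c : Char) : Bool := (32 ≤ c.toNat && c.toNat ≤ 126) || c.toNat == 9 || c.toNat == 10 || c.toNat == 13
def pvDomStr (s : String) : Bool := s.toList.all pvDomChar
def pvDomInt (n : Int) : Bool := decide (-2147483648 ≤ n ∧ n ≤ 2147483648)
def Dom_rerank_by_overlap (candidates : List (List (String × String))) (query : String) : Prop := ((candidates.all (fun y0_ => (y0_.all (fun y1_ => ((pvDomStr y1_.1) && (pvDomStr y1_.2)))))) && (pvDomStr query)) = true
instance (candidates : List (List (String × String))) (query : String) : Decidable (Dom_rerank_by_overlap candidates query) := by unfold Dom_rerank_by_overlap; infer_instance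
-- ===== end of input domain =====

-- B replaces A's stable reverse sort of the scored list by emitting candidates score-class by
-- score-class, scanning scores from len(qset) down to 0 (a counting-style selection, no sort);
-- objective: alternative (same result, no comparison sort).

-- ===== PORT A =====
-- (candidates are dicts under the type convention, so the `isinstance(c, dict)` branch is
-- always taken: text = c.get("text", "").)
def rerank_by_overlap (candidates : List (List (String × String))) (query : String) : List (List (String × String)) :=
  let qset : PySem.Set String := PySem.Set.ofList (PySem.Str.split₀ (PySem.Str.lower query))
  let scored : List (Int × List (String × String)) :=
    candidates.foldl (fun acc c =>
      let text := PySem.Dict.getD ⟨c⟩ "text" ""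
      let words : PySem.Set String := PySem.Set.ofList (PySem.Str.split₀ (PySem.Str.lower text))
      let overlap : Int := ((PySem.Set.inter qset words).length : Int)
      acc ++ [(overlap, c)]) []
  (PySem.List.sorted scored (fun x => x.1) true).map (fun x => x.2)

-- ===== PORT B =====
-- Source B's local helper _score(c)
def pvScore (qset : PySem.Set String) (c : List (String × String)) : Int :=
  let text := PySem.Dict.getD ⟨c⟩ "text" ""
  ((PySem.Set.inter qset (PySem.Set.ofList (PySem.Str.split₀ (PySem.Str.lower text)))).length : Int)

def rerank_by_overlap_alt (candidates : List (List (String × String))) (query : String) : List (List (String × String)) :=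
  let qset : PySem.Set String := PySem.Set.ofList (PySem.Str.split₀ (PySem.Str.lower query))
  let scored : List (Int × List (String × String)) := candidates.map (fun c => (pvScore qset c, c))
  (PySem.List.pyRange (qset.length : Int) (-1) (-1)).foldl
    (fun out s => out ++ (scored.filter (fun p => p.1 == s)).map (fun x => x.2)) []

-- ===== PRECONDITION & SPEC =====
def Spec_rerank_by_overlap (candidates : List (List (String × String))) (query : String) (out : List (List (String × String))) : Prop := out = rerank_by_overlap_alt candidates query
instance (candidates : List (List (String × String))) (query : String) (out : List (List (String × String))) : Decidable (Spec_rerank_by_overlap candidates query out) := by unfold Spec_rerank_by_overlap; infer_instance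

-- ===== CLAIM (what is proved, stated in full; the proofs are below) =====
def Claim_equal_rerank_by_overlap : Prop := ∀ (candidates : List (List (String × String))) (query : String), Dom_rerank_by_overlap candidates query → Spec_rerank_by_overlap candidates query (rerank_by_overlap candidates query)

-- ===== LEMMAS AND PROOFS =====

-- the score classes k, k-1, …, 0 of l, concatenated in descending score order
def pvDescP {α : Type} : Nat → List (Int × α) → List (Int × α)
  | 0, l => l.filter (fun q => q.1 == (0 : Int))
  | k+1, l => l.filter (fun q => q.1 == ((k : Int) + 1)) ++ pvDescP k l

-- descending concatenation of g k, g (k-1), …, g 0 (B's outer loop shape)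
def pvDescParts {α : Type} (g : Int → List α) : Nat → List α
  | 0 => g 0
  | k+1 => g ((k : Int) + 1) ++ pvDescParts g k

theorem pvInsertBy_append {α : Type} (before : α → α → Bool) (x : α) (A B : List α)
    (h : ∀ a ∈ A, before x a = false) :
    PySem.List.insertBy before x (A ++ B) = A ++ PySem.List.insertBy before x B := by
  induction A with
  | nil => simp
  | cons a A ih =>
    simp [PySem.List.insertBy, h a (by simp), ih (fun a ha => h a (by simp [ha]))]

theorem pvMem_descP {α : Type} (k : Nat) (l : List (Int × α)) (p : Int × α)
    (hp : p ∈ pvDescP k l) : p ∈ l ∧ 0 ≤ p.1 ∧ p.1 ≤ (k : Int) := by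
  induction k with
  | zero =>
    simp only [pvDescP, List.mem_filter, beq_iff_eq] at hp
    exact ⟨hp.1, by omega, by omega⟩
  | succ k ih =>
    simp only [pvDescP, List.mem_append, List.mem_filter, beq_iff_eq] at hp
    rcases hp with ⟨hl, he⟩ | h
    · refine ⟨hl, by omega, by push_cast; omega⟩
    · obtain ⟨hl, h0, hb⟩ := ih h
      exact ⟨hl, h0, by push_cast; omega⟩

theorem pvDescP_nil {α : Type} (k : Nat) : pvDescP (α := α) k [] = [] := by
  induction k with
  | zero => simp [pvDescP]
  | succ k ih => simp [pvDescP, ih]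

theorem pvDescP_snoc_of_gt {α : Type} (k : Nat) (x : Int × α) (l : List (Int × α))
    (h : (k : Int) < x.1) : pvDescP k (l ++ [x]) = pvDescP k l := by
  induction k with
  | zero =>
    have hx : (x.1 == (0 : Int)) = false := by simp; omega
    simp [pvDescP, List.filter_append, hx]
  | succ k ih =>
    have hx : (x.1 == ((k : Int) + 1)) = false := by simp; push_cast at h; omega
    simp only [pvDescP, List.filter_append, List.filter_cons, hx, List.filter_nil]
    rw [ih (by push_cast at h ⊢; omega)]
    simp

theorem pvInsert_descP {α : Type} (k : Nat) (x : Int × α) (l : List (Int × α))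
    (h0 : 0 ≤ x.1) (hk : x.1 ≤ (k : Int)) :
    PySem.List.insertBy (fun a b => decide (b.1 < a.1)) x (pvDescP k l) = pvDescP k (l ++ [x]) := by
  induction k with
  | zero =>
    have hx : x.1 = 0 := by omega
    have hall : ∀ a ∈ pvDescP 0 l, (decide (a.1 < x.1)) = false := by
      intro a ha
      obtain ⟨_, h0a, hb⟩ := pvMem_descP 0 l a ha
      simp; omega
    rw [PySem.List.insertBy_of_forall_not_before _ _ _ hall]
    have hxt : (x.1 == (0 : Int)) = true := by simp [hx]
    simp [pvDescP, List.filter_append, hxt]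
  | succ k ih =>
    simp only [pvDescP]
    have hstep : PySem.List.insertBy (fun a b => decide (b.1 < a.1)) x
        ((l.filter (fun q => q.1 == ((k : Int) + 1))) ++ pvDescP k l)
        = (l.filter (fun q => q.1 == ((k : Int) + 1))) ++
          PySem.List.insertBy (fun a b => decide (b.1 < a.1)) x (pvDescP k l) := by
      apply pvInsertBy_append
      intro a ha
      have : a.1 = (k : Int) + 1 := by
        simp only [List.mem_filter, beq_iff_eq] at ha; exact ha.2
      simp; push_cast at hk; omega
    rw [hstep]
    by_cases hx : x.1 = (k : Int) + 1
    · have hins : PySem.List.insertBy (fun a b => decide (b.1 < a.1)) x (pvDescP k l)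
          = x :: pvDescP k l := by
        cases hd : pvDescP k l with
        | nil => simp [PySem.List.insertBy]
        | cons y ys =>
          have hy : y ∈ pvDescP k l := by rw [hd]; simp
          obtain ⟨_, _, hb⟩ := pvMem_descP k l y hy
          have ht : (decide (y.1 < x.1)) = true := by simp; omega
          simp [PySem.List.insertBy, ht]
      rw [hins]
      have hxt : (x.1 == ((k : Int) + 1)) = true := by simp [hx]
      rw [List.filter_append, List.filter_cons, hxt]
      rw [pvDescP_snoc_of_gt k x l (by omega)]
      simp
    · have hxle : x.1 ≤ (k : Int) := by push_cast at hk; omega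
      have hxf : (x.1 == ((k : Int) + 1)) = false := by simp [hx]
      rw [ih hxle, List.filter_append, List.filter_cons, hxf]
      simp

theorem pvSorted_eq_descP {α : Type} (k : Nat) (l : List (Int × α))
    (h : ∀ p ∈ l, 0 ≤ p.1 ∧ p.1 ≤ (k : Int)) :
    PySem.List.sorted l (fun x => x.1) true = pvDescP k l := by
  induction l using List.reverseRecOn with
  | nil => rw [pvDescP_nil]; rfl
  | append_singleton l x ih =>
    rw [PySem.List.sorted_rev_eq_foldl_insertBy, List.foldl_append]
    simp only [List.foldl_cons, List.foldl_nil]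
    rw [← PySem.List.sorted_rev_eq_foldl_insertBy]
    rw [ih (fun p hp => h p (by simp [hp]))]
    obtain ⟨h0, hk⟩ := h x (by simp)
    exact pvInsert_descP k x l h0 hk

theorem pvPyRange_desc (k : Nat) :
    PySem.List.pyRange (k : Int) (-1) (-1) = (List.range (k + 1)).map (fun j : Nat => (k : Int) + (-1) * (j : Int)) := by
  rw [PySem.List.pyRange]
  have hlt : ((-1 : Int) < (k : Int)) := by omega
  simp only [if_neg (by norm_num : ¬ ((-1 : Int) = 0)), if_neg (by norm_num : ¬ ((0 : Int) < -1)),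
    if_pos hlt]
  have : (((k : Int) - (-1) + -(-1) - 1) / -(-1)).toNat = k + 1 := by norm_num
  rw [this]

theorem pvFlatMap_range_desc {α : Type} (g : Int → List α) (k : Nat) :
    (List.range (k + 1)).flatMap (fun j : Nat => g ((k : Int) + (-1) * (j : Int))) = pvDescParts g k := by
  induction k with
  | zero => simp [pvDescParts]
  | succ k ih =>
    rw [List.range_succ_eq_map, List.flatMap_cons, List.flatMap_map]
    have h2 : ∀ a ∈ List.range (k + 1),
        g (((k + 1 : Nat) : Int) + (-1) * ((Nat.succ a : Nat) : Int)) = g ((k : Int) + (-1) * (a : Int)) := by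
      intro a _
      congr 1
      push_cast
      ring
    rw [List.flatMap_congr h2, ih]
    have h3 : ((k + 1 : Nat) : Int) + (-1) * ((0 : Nat) : Int) = (k : Int) + 1 := by push_cast; ring
    rw [h3]
    rfl

theorem pvMap_descParts {α β : Type} (f : α → β) (g : Int → List α) (k : Nat) :
    (pvDescParts g k).map f = pvDescParts (fun s => (g s).map f) k := by
  induction k with
  | zero => rfl
  | succ k ih => simp only [pvDescParts, List.map_append, ih]

theorem pvDescParts_filter {α : Type} (l : List (Int × α)) (k : Nat) :
    pvDescParts (fun s => l.filter (fun q => q.1 == s)) k = pvDescP k l := by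
  induction k with
  | zero => rfl
  | succ k ih => simp only [pvDescParts, pvDescP, ih]

-- ===== VERDICT (by name: the statement is the Claim_ definition above) =====
theorem rerank_by_overlap_spec : Claim_equal_rerank_by_overlap := by
  intro candidates query _
  unfold Spec_rerank_by_overlap rerank_by_overlap rerank_by_overlap_alt
  simp only []
  set qset : PySem.Set String := PySem.Set.ofList (PySem.Str.split₀ (PySem.Str.lower query)) with hq
  set k : Nat := qset.length with hkdef
  rw [show (fun (acc : List (Int × List (String × String))) (c : List (String × String)) =>
        let text := PySem.Dict.getD ⟨c⟩ "text" ""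
        let words : PySem.Set String := PySem.Set.ofList (PySem.Str.split₀ (PySem.Str.lower text))
        let overlap : Int := ((PySem.Set.inter qset words).length : Int)
        acc ++ [(overlap, c)])
      = (fun acc c => acc ++ [(pvScore qset c, c)]) from rfl]
  rw [PySem.List.foldl_append_singleton_eq_map]
  set scored : List (Int × List (String × String)) := candidates.map (fun c => (pvScore qset c, c)) with hs
  rw [PySem.List.foldl_append_eq_flatMap, pvPyRange_desc, List.flatMap_map]
  simp only [List.nil_append]
  rw [pvFlatMap_range_desc (fun s => (scored.filter (fun p => p.1 == s)).map (fun x => x.2)) k]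
  rw [← pvMap_descParts, pvDescParts_filter]
  have hbound : ∀ p ∈ scored, 0 ≤ p.1 ∧ p.1 ≤ (k : Int) := by
    intro p hp
    rw [hs] at hp
    simp only [List.mem_map] at hp
    obtain ⟨c, _, rfl⟩ := hp
    refine ⟨Int.natCast_nonneg _, ?_⟩
    simp only [pvScore]
    have := List.length_filter_le (fun x => PySem.Set.contains
      (PySem.Set.ofList (PySem.Str.split₀ (PySem.Str.lower (PySem.Dict.getD ⟨c⟩ "text" "")))) x) qset
    rw [hkdef]
    exact_mod_cast this
  rw [pvSorted_eq_descP k scored hbound]
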